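-- pv_equiv track=rewrite | github.com/scliff108/Advent-of-Code-2023 | src/day1.py | insert_first_digit
-- ===== SOURCE A (Python) =====
-- def insert_first_digit(line, replacements):
--     first = len(line)
--     # Get the index of each number (string) in the line
--     # -1 if the number (string) is not in the line
--     idx = [line.find(word) for word in replacements]
--
--     # Get the starting index of the first number (string) in the line
--     for i in idx:
--         if i >= 0 and i < first:
--             first = i
--
--     # Check that we actually found a number (string)
--     if first < len(line):
--         # Insert the digit of the number (string) just before the word
--         i = idx.index(first)
--         line = line[:first] + str(i + 1) + line[first:]
--
--     return line
-- ===== SOURCE B (Python) =====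
-- def insert_first_digit(line, replacements):
--     # Single left-to-right positional scan: first position where any word starts wins.
--     for p in range(len(line)):
--         for i, word in enumerate(replacements):
--             if line.startswith(word, p):
--                 return line[:p] + str(i + 1) + line[p:]
--     return line
-- ===== Notes on version B (the rewrite author's own statement) =====
-- stated objective: faster
-- what changed: Instead of running find() over the whole line for every word, folding for the minimum and re-looking the word up with list.index, B scans positions left to right and returns at the first position where some replacement word starts (first word in list order wins).
import Mathlib
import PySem

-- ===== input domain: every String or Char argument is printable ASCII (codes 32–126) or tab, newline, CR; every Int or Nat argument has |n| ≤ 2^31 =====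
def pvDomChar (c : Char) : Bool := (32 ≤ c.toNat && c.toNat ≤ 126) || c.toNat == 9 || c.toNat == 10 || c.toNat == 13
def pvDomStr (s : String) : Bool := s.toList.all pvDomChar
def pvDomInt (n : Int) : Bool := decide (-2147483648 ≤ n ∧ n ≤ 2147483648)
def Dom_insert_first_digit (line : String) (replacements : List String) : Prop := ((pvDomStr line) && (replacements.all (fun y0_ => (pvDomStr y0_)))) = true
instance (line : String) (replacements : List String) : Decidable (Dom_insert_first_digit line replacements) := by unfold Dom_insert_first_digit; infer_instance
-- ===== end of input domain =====

-- B replaces A's "compute every word's find(), fold for the minimum, then re-look the word up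
-- with list.index" by a single left-to-right positional scan that finds the earliest word
-- directly and returns at the first match instead of always scanning the whole line (objective: faster; a timing run measured B faster on the generated inputs).

-- ===== PORT A =====
-- idx = [line.find(word) for word in replacements]; fold for the least non-negative index;
-- if found, i = idx.index(first); line[:first] + str(i+1) + line[first:]
def insert_first_digit (line : String) (replacements : List String) : String :=
  let cs := line.toList
  let first : Int := PySem.Chars.len cs
  let idx : List Int := replacements.map (fun word => PySem.Chars.find cs word.toList)
  let first : Int := idx.foldl (fun f i => if 0 ≤ i ∧ i < f then i else f) first
  if first < PySem.Chars.len cs then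
    match PySem.List.index? idx first with
    | some i =>
        String.ofList (PySem.Chars.slice cs none (some first)
          ++ (PySem.Int.toStr ((i : Int) + 1)).toList
          ++ PySem.Chars.slice cs (some first) none)
    | none => line   -- unreachable: first < len(line) forces first ∈ idx, so idx.index never raises
  else line

-- ===== PORT B =====
-- inner loop: 'for i, word in enumerate(replacements): if line.startswith(word, p)';
-- line.startswith(word, p) with 0 ≤ p < len(line) is exactly word <+: cs.drop p
def altScanWords (cs : List Char) (p : Nat) : List (Int × String) → Option Int
  | [] => none
  | (i, word) :: rest =>
      if PySem.Chars.startswith (cs.drop p) word.toList then some i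
      else altScanWords cs p rest

-- outer loop: 'for p in range(len(line))', returning at the first position that matches
def altFind (cs : List Char) (reps : List (Int × String)) : List Nat → Option (Nat × Int)
  | [] => none
  | p :: ps =>
      match altScanWords cs p reps with
      | some i => some (p, i)
      | none => altFind cs reps ps

def insert_first_digit_alt (line : String) (replacements : List String) : String :=
  let cs := line.toList
  match altFind cs (PySem.List.enumerate replacements 0) (List.range cs.length) with
  | some (p, i) =>
      String.ofList (PySem.Chars.slice cs none (some (p : Int))
        ++ (PySem.Int.toStr (i + 1)).toList
        ++ PySem.Chars.slice cs (some (p : Int)) none)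
  | none => line

-- ===== PRECONDITION & SPEC =====
def Spec_insert_first_digit (line : String) (replacements : List String) (out : String) : Prop := out = insert_first_digit_alt line replacements
instance (line : String) (replacements : List String) (out : String) : Decidable (Spec_insert_first_digit line replacements out) := by unfold Spec_insert_first_digit; infer_instance

-- ===== CLAIM (what is proved, stated in full; the proofs are below) =====
def Claim_equal_insert_first_digit : Prop := ∀ (line : String) (replacements : List String), Dom_insert_first_digit line replacements → Spec_insert_first_digit line replacements (insert_first_digit line replacements)

-- ===== LEMMAS AND PROOFS =====

-- The fold step of A
def pvStep (f i : Int) : Int := if 0 ≤ i ∧ i < f then i else f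

theorem pvFold_le (idx : List Int) (acc : Int) :
    idx.foldl pvStep acc ≤ acc := by
  induction idx generalizing acc with
  | nil => simp
  | cons x xs ih =>
    simp only [List.foldl_cons]
    refine le_trans (ih _) ?_
    unfold pvStep; split_ifs with h
    · exact le_of_lt h.2
    · exact le_rfl

theorem pvFold_le_mem (idx : List Int) (acc : Int) (i : Int) (hi : i ∈ idx) (h0 : 0 ≤ i) :
    idx.foldl pvStep acc ≤ i := by
  induction idx generalizing acc with
  | nil => simp at hi
  | cons x xs ih =>
    simp only [List.foldl_cons]
    rcases List.mem_cons.1 hi with rfl | hmem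
    · refine le_trans (pvFold_le _ _) ?_
      unfold pvStep; split_ifs with h
      · exact le_rfl
      · omega
    · exact ih _ hmem

theorem pvFold_mem_or_eq (idx : List Int) (acc : Int) :
    idx.foldl pvStep acc = acc ∨ (idx.foldl pvStep acc ∈ idx ∧ 0 ≤ idx.foldl pvStep acc) := by
  induction idx generalizing acc with
  | nil => simp
  | cons x xs ih =>
    simp only [List.foldl_cons]
    rcases ih (pvStep acc x) with h | h
    · rw [h]; unfold pvStep; split_ifs with hc
      · exact Or.inr ⟨List.mem_cons_self, hc.1⟩
      · exact Or.inl rfl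
    · exact Or.inr ⟨List.mem_cons_of_mem _ h.1, h.2⟩

-- a word matching anywhere in cs has a non-negative find
theorem pvFind_nonneg_of_prefix_drop (cs w : List Char) (p : Nat) (h : w <+: cs.drop p) :
    0 ≤ PySem.Chars.find cs w := by
  refine (PySem.Chars.find_nonneg_iff cs w).2 ?_
  exact h.isInfix.trans (List.drop_suffix p cs).isInfix

-- find's minimality: a match at p gives find ≤ p
theorem pvFind_le_of_prefix_drop (cs w : List Char) (p : Nat) (h : w <+: cs.drop p) :
    PySem.Chars.find cs w ≤ (p : Int) := by
  have h0 := pvFind_nonneg_of_prefix_drop cs w p h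
  by_contra hlt
  rw [not_le] at hlt
  have hspec := (PySem.Chars.find_spec h0).2
  exact hspec p (by omega) h

-- bridge: if "match at p" ↔ "find = p" for every listed word, the inner scan of B computes
-- exactly what A's idx.index(first) computes (shifted by the enumerate start)
theorem pvScan_eq_index (cs : List Char) (p : Nat) (reps : List String) (k : Int)
    (hiff : ∀ w ∈ reps, (w.toList <+: cs.drop p ↔ PySem.Chars.find cs w.toList = (p : Int))) :
    altScanWords cs p (PySem.List.enumerate reps k)
      = (PySem.List.index? (reps.map (fun w => PySem.Chars.find cs w.toList)) (p : Int)).map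
          (fun j => k + (j : Int)) := by
  induction reps generalizing k with
  | nil => simp [altScanWords, PySem.List.enumerate_nil, PySem.List.index?]
  | cons w ws ih =>
    rw [PySem.List.enumerate_cons]
    simp only [altScanWords, List.map_cons]
    by_cases hp : w.toList <+: cs.drop p
    · have hf : PySem.Chars.find cs w.toList = (p : Int) := (hiff w (by simp)).1 hp
      rw [if_pos ((PySem.Chars.startswith_iff _ _).2 hp)]
      rw [hf, PySem.List.index?_cons_self]
      simp
    · have hf : PySem.Chars.find cs w.toList ≠ (p : Int) := fun h => hp ((hiff w (by simp)).2 h)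
      have hsw : PySem.Chars.startswith (cs.drop p) w.toList = false := by
        cases hb : PySem.Chars.startswith (cs.drop p) w.toList
        · rfl
        · exact absurd ((PySem.Chars.startswith_iff _ _).1 hb) hp
      rw [hsw]
      simp only [Bool.false_eq_true, if_false]
      rw [ih (k + 1) (fun w hw => hiff w (by simp [hw]))]
      rw [PySem.List.index?_cons_of_ne _ hf]
      cases PySem.List.index? (ws.map (fun w => PySem.Chars.find cs w.toList)) (p : Int) with
      | none => simp
      | some j => simp; ring

theorem pvScan_none (cs : List Char) (p : Nat) (reps : List String) (k : Int)
    (h : ∀ w ∈ reps, ¬ w.toList <+: cs.drop p) :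
    altScanWords cs p (PySem.List.enumerate reps k) = none := by
  induction reps generalizing k with
  | nil => simp [altScanWords, PySem.List.enumerate_nil]
  | cons w ws ih =>
    rw [PySem.List.enumerate_cons]
    simp only [altScanWords]
    have hsw : PySem.Chars.startswith (cs.drop p) w.toList = false := by
      cases hb : PySem.Chars.startswith (cs.drop p) w.toList
      · rfl
      · exact absurd ((PySem.Chars.startswith_iff _ _).1 hb) (h w (by simp))
    rw [hsw]
    simp only [Bool.false_eq_true, if_false]
    exact ih (k + 1) (fun w hw => h w (by simp [hw]))

theorem pvAltFind_none (cs : List Char) (reps : List (Int × String)) (ps : List Nat)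
    (h : ∀ p ∈ ps, altScanWords cs p reps = none) :
    altFind cs reps ps = none := by
  induction ps with
  | nil => rfl
  | cons p ps ih =>
    simp only [altFind, h p (by simp)]
    exact ih (fun q hq => h q (by simp [hq]))

theorem pvAltFind_append (cs : List Char) (reps : List (Int × String)) (ps qs : List Nat)
    (h : altFind cs reps ps = none) :
    altFind cs reps (ps ++ qs) = altFind cs reps qs := by
  induction ps with
  | nil => simp
  | cons p ps ih =>
    simp only [altFind, List.cons_append] at h ⊢
    cases hs : altScanWords cs p reps with
    | none => rw [hs] at h; simp only at h; exact ih h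
    | some i => rw [hs] at h; simp at h

theorem pvAltFind_range (cs : List Char) (reps : List (Int × String)) (n P : Nat) (i : Int)
    (hPn : P < n)
    (hbelow : ∀ q < P, altScanWords cs q reps = none)
    (hP : altScanWords cs P reps = some i) :
    altFind cs reps (List.range n) = some (P, i) := by
  have hsplit : List.range n = List.range P ++ (P :: (List.range (n - P - 1)).map (fun k => P + 1 + k)) := by
    rw [show n = (P + 1) + (n - P - 1) from by omega, List.range_add, List.range_succ,
      List.append_assoc]
    have he : P + 1 + (n - P - 1) - P - 1 = n - P - 1 := by omega
    simp [he]
  rw [hsplit, pvAltFind_append]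
  · simp only [altFind, hP]
  · exact pvAltFind_none _ _ _ (fun q hq => hbelow q (List.mem_range.1 hq))

-- main equivalence
theorem pvMain (line : String) (replacements : List String) :
    insert_first_digit line replacements = insert_first_digit_alt line replacements := by
  unfold insert_first_digit insert_first_digit_alt
  simp only [PySem.Chars.len_eq]
  set cs := line.toList with hcs
  set idx := replacements.map (fun word => PySem.Chars.find cs word.toList) with hidx
  set fA := idx.foldl pvStep ((cs.length : Int)) with hfA
  have hfold : idx.foldl (fun f i => if 0 ≤ i ∧ i < f then i else f) ((cs.length : Int)) = fA := rfl
  rw [hfold]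
  by_cases hlt : fA < (cs.length : Int)
  · -- a word was found; fA ∈ idx, 0 ≤ fA
    rw [if_pos hlt]
    rcases pvFold_mem_or_eq idx ((cs.length : Int)) with heq | ⟨hmem, h0⟩
    · rw [← hfA] at heq; omega
    · rw [← hfA] at hmem h0
      set P : Nat := fA.toNat with hP
      have hPf : (P : Int) = fA := Int.toNat_of_nonneg h0
      have hPn : P < cs.length := by omega
      -- the pointwise iff at position P
      have hiff : ∀ w ∈ replacements,
          (w.toList <+: cs.drop P ↔ PySem.Chars.find cs w.toList = (P : Int)) := by
        intro w hw
        constructor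
        · intro hp
          have h1 := pvFind_le_of_prefix_drop cs w.toList P hp
          have h2 : fA ≤ PySem.Chars.find cs w.toList :=
            pvFold_le_mem idx _ _ (by rw [hidx]; exact List.mem_map_of_mem hw)
              (pvFind_nonneg_of_prefix_drop cs w.toList P hp)
          omega
        · intro hf
          have h0' : 0 ≤ PySem.Chars.find cs w.toList := by omega
          have := (PySem.Chars.find_spec h0').1
          rw [hf] at this
          simpa using this
      -- below P nothing matches
      have hbelow : ∀ q < P, altScanWords cs q (PySem.List.enumerate replacements 0) = none := by
        intro q hq
        refine pvScan_none cs q replacements 0 ?_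
        intro w hw hp
        have h1 := pvFind_le_of_prefix_drop cs w.toList q hp
        have h2 : fA ≤ PySem.Chars.find cs w.toList :=
          pvFold_le_mem idx _ _ (by rw [hidx]; exact List.mem_map_of_mem hw)
            (pvFind_nonneg_of_prefix_drop cs w.toList q hp)
        omega
      -- fA ∈ idx, so index? finds some j
      have hsome : (PySem.List.index? idx fA).isSome := (PySem.List.index?_isSome_iff _ _).2 hmem
      cases hix : PySem.List.index? idx fA with
      | none => rw [hix] at hsome; simp at hsome
      | some j =>
        have hix' := hix
        rw [← hPf] at hix'
        have hscanP : altScanWords cs P (PySem.List.enumerate replacements 0) = some ((j : Int)) := by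
          rw [pvScan_eq_index cs P replacements 0 hiff, hix']
          simp
        rw [pvAltFind_range cs _ cs.length P ((j : Int)) hPn hbelow hscanP]
        simp [← hPf]
  · -- nothing found: both sides return line
    rw [if_neg hlt]
    have hnone : altFind cs (PySem.List.enumerate replacements 0) (List.range cs.length) = none := by
      refine pvAltFind_none _ _ _ ?_
      intro p hp
      refine pvScan_none cs p replacements 0 ?_
      intro w hw hpre
      have h1 := pvFind_le_of_prefix_drop cs w.toList p hpre
      have h2 : fA ≤ PySem.Chars.find cs w.toList :=
        pvFold_le_mem idx _ _ (by rw [hidx]; exact List.mem_map_of_mem hw)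
          (pvFind_nonneg_of_prefix_drop cs w.toList p hpre)
      have hplen : p < cs.length := List.mem_range.1 hp
      omega
    rw [hnone]

-- ===== VERDICT (by name: the statement is the Claim_ definition above) =====
theorem insert_first_digit_spec : Claim_equal_insert_first_digit := by
  intro line replacements _
  unfold Spec_insert_first_digit
  exact pvMain line replacements
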